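-- pv_equiv track=rewrite | github.com/gpapachr/AoC-2023 | day2/Day2.py | check_possible_games
-- ===== SOURCE A (Python) =====
-- def check_possible_games(game_results, red_count, green_count, blue_count):
--     possible_games = []
--     for game_id, rounds in game_results:
--         valid_game = True
--         for round in rounds:
--             cubes = [cube.strip().split() for cube in round.split(',')]
--             for cube in cubes:
--                 color, count = cube[1], int(cube[0])
--                 if color == 'red' and count > red_count:
--                     valid_game = False
--                     break
--                 elif color == 'green' and count > green_count:
--                     valid_game = False
--                     break
--                 elif color == 'blue' and count > blue_count:
--                     valid_game = False
--                     break
--             if not valid_game: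
--                 break
--         if valid_game:
--             possible_games.append(game_id)
--     return possible_games
-- ===== SOURCE B (Python) =====
-- def check_possible_games(game_results, red_count, green_count, blue_count):
--     possible_games = []
--     for game_id, rounds in game_results:
--         # running maxima, seeded with the limits themselves: the game is
--         # possible iff no cube ever pushes a maximum above its seed
--         max_red, max_green, max_blue = red_count, green_count, blue_count
--         for rnd in rounds:
--             for token in rnd.split(','):
--                 parts = token.strip().split()
--                 count, color = int(parts[0]), parts[1]
--                 if color == 'red':
--                     max_red = max(max_red, count)
--                 elif color == 'green':
--                     max_green = max(max_green, count)
--                 elif color == 'blue':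
--                     max_blue = max(max_blue, count)
--         if max_red <= red_count and max_green <= green_count and max_blue <= blue_count:
--             possible_games.append(game_id)
--     return possible_games
-- ===== Notes on version B (the rewrite author's own statement) =====
-- stated objective: alternative
-- what changed: B replaces A's per-cube early-exit validity flag (triple nested break) with a single aggregate pass that accumulates the running maximum count per color (seeded with the limit itself) and decides possibility once per game by comparing the three maxima to the limits.
-- outside the precondition, e.g. on check_possible_games([(1, ['5 red, garbage'])], 2, 2, 2): A returns [], B raises ValueError
import Mathlib
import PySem

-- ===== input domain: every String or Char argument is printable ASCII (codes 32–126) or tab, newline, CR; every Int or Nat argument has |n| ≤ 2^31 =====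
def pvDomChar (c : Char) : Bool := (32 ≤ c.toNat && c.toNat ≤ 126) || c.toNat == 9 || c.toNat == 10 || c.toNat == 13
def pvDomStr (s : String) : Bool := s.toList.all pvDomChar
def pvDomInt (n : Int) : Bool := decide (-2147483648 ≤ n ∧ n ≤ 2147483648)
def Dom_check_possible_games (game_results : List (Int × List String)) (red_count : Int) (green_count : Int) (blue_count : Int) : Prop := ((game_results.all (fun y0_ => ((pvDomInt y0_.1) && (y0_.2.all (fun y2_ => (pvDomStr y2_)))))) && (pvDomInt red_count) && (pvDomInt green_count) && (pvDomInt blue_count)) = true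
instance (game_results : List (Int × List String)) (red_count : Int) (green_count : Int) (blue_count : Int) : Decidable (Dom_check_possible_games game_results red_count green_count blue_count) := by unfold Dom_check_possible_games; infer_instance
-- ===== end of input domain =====

-- B replaces A's per-cube early-exit validity flag with one aggregate pass keeping the running
-- maximum count per color (seeded with the limit), deciding each game once at the end.

-- ===== PORT A =====

-- round.split(','): non-empty literal separator, so Python never raises; split? is some here
def pvSplitComma (s : String) : List String := (PySem.Str.split? s ",").getD []

-- cubes = [cube.strip().split() for cube in round.split(',')]
def pvParseRound (rnd : String) : List (List String) :=
  (pvSplitComma rnd).map (fun cube => PySem.Str.split₀ (PySem.Str.strip cube))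

-- inner 'for cube in cubes' loop with its breaks: returns valid_game
def pvACubes (red_count green_count blue_count : Int) : List (List String) → Bool
  | [] => true
  | cube :: rest =>
    let color := (PySem.List.pyGet? cube 1).getD ""
    let count := ((PySem.Int.ofStr? ((PySem.List.pyGet? cube 0).getD ""))).getD 0
    if color == "red" && count > red_count then false
    else if color == "green" && count > green_count then false
    else if color == "blue" && count > blue_count then false
    else pvACubes red_count green_count blue_count rest

-- 'for round in rounds' loop with its 'if not valid_game: break'
def pvARounds (red_count green_count blue_count : Int) : List String → Bool
  | [] => true
  | rnd :: rest =>
    if pvACubes red_count green_count blue_count (pvParseRound rnd) then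
      pvARounds red_count green_count blue_count rest
    else false

def check_possible_games (game_results : List (Int × List String)) (red_count : Int) (green_count : Int) (blue_count : Int) : List Int :=
  game_results.foldl (fun possible_games gr =>
    if pvARounds red_count green_count blue_count gr.2 then possible_games ++ [gr.1]
    else possible_games) []

-- ===== PORT B =====

-- one cube token: update the (max_red, max_green, max_blue) triple
def pvBCube (m : Int × Int × Int) (token : String) : Int × Int × Int :=
  let parts := PySem.Str.split₀ (PySem.Str.strip token)
  let count := ((PySem.Int.ofStr? ((PySem.List.pyGet? parts 0).getD ""))).getD 0
  let color := (PySem.List.pyGet? parts 1).getD ""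
  if color == "red" then (max m.1 count, m.2.1, m.2.2)
  else if color == "green" then (m.1, max m.2.1 count, m.2.2)
  else if color == "blue" then (m.1, m.2.1, max m.2.2 count)
  else m

def pvBMaxima (red_count green_count blue_count : Int) (rounds : List String) : Int × Int × Int :=
  rounds.foldl (fun m rnd => (pvSplitComma rnd).foldl pvBCube m)
    (red_count, green_count, blue_count)

def check_possible_games_alt (game_results : List (Int × List String)) (red_count : Int) (green_count : Int) (blue_count : Int) : List Int :=
  game_results.foldl (fun possible_games gr =>
    let m := pvBMaxima red_count green_count blue_count gr.2
    if m.1 ≤ red_count ∧ m.2.1 ≤ green_count ∧ m.2.2 ≤ blue_count then possible_games ++ [gr.1]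
    else possible_games) []

-- ===== PRECONDITION & SPEC =====
-- Pre_ requires every cube token of every round to be well formed (at least two
-- whitespace-separated fields, the first an int literal); on malformed tokens the Python A
-- raises ValueError/IndexError, except when an earlier over-limit cube short-circuits the scan
-- before the malformed token is parsed — those inputs (on which A returns) are also excluded,
-- and there B raises since it always scans the whole game.
def Pre_check_possible_games (game_results : List (Int × List String)) (red_count : Int) (green_count : Int) (blue_count : Int) : Prop :=
  ∀ gr ∈ game_results, ∀ rnd ∈ gr.2, ∀ tok ∈ pvSplitComma rnd,
    2 ≤ (PySem.Str.split₀ (PySem.Str.strip tok)).length ∧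
    (PySem.Int.ofStr? ((PySem.Str.split₀ (PySem.Str.strip tok)).headD "")).isSome = true

instance (game_results : List (Int × List String)) (red_count : Int) (green_count : Int) (blue_count : Int) : Decidable (Pre_check_possible_games game_results red_count green_count blue_count) := by unfold Pre_check_possible_games; infer_instance

def pvWitness_check_possible_games : (List (Int × List String)) × Int × Int × Int :=
  ([(1, ["3 red, 2 blue", "1 green"]), (2, ["15 blue"])], 4, 4, 4)

def Spec_check_possible_games (game_results : List (Int × List String)) (red_count : Int) (green_count : Int) (blue_count : Int) (out : List Int) : Prop := out = check_possible_games_alt game_results red_count green_count blue_count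
instance (game_results : List (Int × List String)) (red_count : Int) (green_count : Int) (blue_count : Int) (out : List Int) : Decidable (Spec_check_possible_games game_results red_count green_count blue_count out) := by unfold Spec_check_possible_games; infer_instance

-- ===== CLAIM (what is proved, stated in full; the proofs are below) =====
def Claim_equal_check_possible_games : Prop := ∀ (game_results : List (Int × List String)) (red_count : Int) (green_count : Int) (blue_count : Int), Dom_check_possible_games game_results red_count green_count blue_count → Pre_check_possible_games game_results red_count green_count blue_count → Spec_check_possible_games game_results red_count green_count blue_count (check_possible_games game_results red_count green_count blue_count)

-- ===== LEMMAS AND PROOFS =====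

-- a single cube is within the limits (shared characterisation)
def pvCubeOk (red_count green_count blue_count : Int) (cube : List String) : Bool :=
  let color := (PySem.List.pyGet? cube 1).getD ""
  let count := ((PySem.Int.ofStr? ((PySem.List.pyGet? cube 0).getD ""))).getD 0
  !(color == "red" && count > red_count) && !(color == "green" && count > green_count)
    && !(color == "blue" && count > blue_count)

theorem pvACubes_eq_all (r g b : Int) (cubes : List (List String)) :
    pvACubes r g b cubes = cubes.all (pvCubeOk r g b) := by
  induction cubes with
  | nil => rfl
  | cons c rest ih =>
    simp only [pvACubes, pvCubeOk, List.all_cons, ih]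
    split_ifs with h1 h2 h3 <;> simp_all <;> tauto

theorem pvBCube_le_iff (r g b : Int) (m : Int × Int × Int) (t : String) :
    ((pvBCube m t).1 ≤ r ∧ (pvBCube m t).2.1 ≤ g ∧ (pvBCube m t).2.2 ≤ b) ↔
      (m.1 ≤ r ∧ m.2.1 ≤ g ∧ m.2.2 ≤ b ∧
        pvCubeOk r g b (PySem.Str.split₀ (PySem.Str.strip t)) = true) := by
  simp only [pvBCube, pvCubeOk]
  generalize ((PySem.Int.ofStr? ((PySem.List.pyGet?
      (PySem.Str.split₀ (PySem.Str.strip t)) 0).getD ""))).getD 0 = count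
  generalize (PySem.List.pyGet? (PySem.Str.split₀ (PySem.Str.strip t)) 1).getD "" = color
  split_ifs with h1 h2 h3 <;>
    simp only [h1, max_le_iff] <;> simp_all <;> omega

theorem pvBMaxima_le_iff (r g b : Int) (m : Int × Int × Int) (toks : List String) :
    (((toks.foldl pvBCube m).1 ≤ r ∧ (toks.foldl pvBCube m).2.1 ≤ g ∧
      (toks.foldl pvBCube m).2.2 ≤ b)) ↔
      (m.1 ≤ r ∧ m.2.1 ≤ g ∧ m.2.2 ≤ b ∧
        (toks.map (fun t => PySem.Str.split₀ (PySem.Str.strip t))).all (pvCubeOk r g b) = true) := by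
  induction toks generalizing m with
  | nil => simp
  | cons t rest ih =>
    simp only [List.foldl_cons, List.map_cons, List.all_cons, Bool.and_eq_true]
    rw [ih]
    have h := pvBCube_le_iff r g b m t
    constructor
    · rintro ⟨a1, a2, a3, w⟩
      obtain ⟨m1, m2, m3, c⟩ := h.mp ⟨a1, a2, a3⟩
      exact ⟨m1, m2, m3, c, w⟩
    · rintro ⟨m1, m2, m3, c, w⟩
      obtain ⟨a1, a2, a3⟩ := h.mpr ⟨m1, m2, m3, c⟩
      exact ⟨a1, a2, a3, w⟩

theorem pvARounds_eq_all (r g b : Int) (rounds : List String) :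
    pvARounds r g b rounds =
      rounds.all (fun rnd => (pvParseRound rnd).all (pvCubeOk r g b)) := by
  induction rounds with
  | nil => rfl
  | cons rnd rest ih =>
    simp only [pvARounds, List.all_cons, pvACubes_eq_all, ih]
    split_ifs with h <;> simp [h]

theorem pvBRounds_le_iff (r g b : Int) (m : Int × Int × Int) (rounds : List String) :
    (((rounds.foldl (fun m rnd => (pvSplitComma rnd).foldl pvBCube m) m).1 ≤ r ∧
      (rounds.foldl (fun m rnd => (pvSplitComma rnd).foldl pvBCube m) m).2.1 ≤ g ∧
      (rounds.foldl (fun m rnd => (pvSplitComma rnd).foldl pvBCube m) m).2.2 ≤ b)) ↔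
      (m.1 ≤ r ∧ m.2.1 ≤ g ∧ m.2.2 ≤ b ∧
        rounds.all (fun rnd => (pvParseRound rnd).all (pvCubeOk r g b)) = true) := by
  induction rounds generalizing m with
  | nil => simp
  | cons rnd rest ih =>
    simp only [List.foldl_cons, List.all_cons, Bool.and_eq_true]
    rw [ih]
    have h := pvBMaxima_le_iff r g b m (pvSplitComma rnd)
    unfold pvParseRound
    constructor
    · rintro ⟨a1, a2, a3, w⟩
      obtain ⟨m1, m2, m3, c⟩ := h.mp ⟨a1, a2, a3⟩
      exact ⟨m1, m2, m3, c, w⟩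
    · rintro ⟨m1, m2, m3, c, w⟩
      obtain ⟨a1, a2, a3⟩ := h.mpr ⟨m1, m2, m3, c⟩
      exact ⟨a1, a2, a3, w⟩

theorem pvGame_agree (r g b : Int) (rounds : List String) :
    ((pvBMaxima r g b rounds).1 ≤ r ∧ (pvBMaxima r g b rounds).2.1 ≤ g ∧
        (pvBMaxima r g b rounds).2.2 ≤ b) ↔ pvARounds r g b rounds = true := by
  unfold pvBMaxima
  rw [pvBRounds_le_iff, pvARounds_eq_all]
  simp

-- ===== VERDICT (by name: the statement is the Claim_ definition above) =====
theorem check_possible_games_spec : Claim_equal_check_possible_games := by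
  intro game_results r g b _ _
  unfold Spec_check_possible_games check_possible_games check_possible_games_alt
  have hf : (fun (pg : List Int) (gr : Int × List String) =>
        if pvARounds r g b gr.2 then pg ++ [gr.1] else pg) =
      (fun (pg : List Int) (gr : Int × List String) =>
        let m := pvBMaxima r g b gr.2
        if m.1 ≤ r ∧ m.2.1 ≤ g ∧ m.2.2 ≤ b then pg ++ [gr.1] else pg) := by
    funext pg gr
    exact if_congr (pvGame_agree r g b gr.2).symm rfl rfl
  rw [hf]
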